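-- pv_equiv track=rewrite | github.com/qsantos/advent-of-code | 2018/day20/main.py | find_graph
-- ===== SOURCE A (Python) =====
-- from typing import Dict, Set, Tuple
--
-- Coord = Tuple[int, int]
--
-- Graph = Dict[Coord, Set[Coord]]
--
-- def find_graph(regex: str) -> Graph:
--     def move(coord: Coord, dir: str) -> Coord:
--         x, y = coord
--         if dir == 'N':
--             n = x, y - 1
--         elif dir == 'S':
--             n = x, y + 1
--         elif dir == 'W':
--             n = x - 1, y
--         elif dir == 'E':
--             n = x + 1, y
--         else:
--             assert False
--         if coord not in graph:
--             graph[coord] = set()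
--         if n not in graph:
--             graph[n] = set()
--         graph[coord].add(n)
--         graph[n].add(coord)
--         return n
--
--     def aux(starts: Set[Coord]) -> Set[Coord]:
--         finals: Set[Coord] = set()
--         cur = starts
--         for c in it:
--             if c == '^':
--                 continue
--             elif c == '(':
--                 cur = aux(cur)
--             elif c == '|':
--                 finals |= cur
--                 cur = starts
--             elif c == ')' or c == '$':
--                 return finals | cur
--             else:
--                 cur = {move(coord, c) for coord in cur}
--         assert False
--     graph: Graph = {}
--     it = iter(regex)
--     aux({(0, 0)})
--     return graph
-- ===== SOURCE B (Python) =====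
-- def find_graph(regex):
--     # Pass 1: iterative traversal (explicit stack of saved frames) collecting an edge list only.
--     # Pass 2: build the adjacency dict by replaying the edges.
--     def step(coord, ch):
--         x, y = coord
--         if ch == 'N':
--             return (x, y - 1)
--         if ch == 'S':
--             return (x, y + 1)
--         if ch == 'W':
--             return (x - 1, y)
--         if ch == 'E':
--             return (x + 1, y)
--         assert False
--
--     edges = []
--     starts = {(0, 0)}
--     finals = set()
--     cur = starts
--     stack = []
--     for ch in regex:
--         if ch == '^':
--             continue
--         elif ch == '(':
--             stack.append((starts, finals))
--             starts = cur
--             finals = set()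
--         elif ch == '|':
--             finals = finals | cur
--             cur = starts
--         elif ch == ')' or ch == '$':
--             if not stack:
--                 break
--             cur = finals | cur
--             starts, finals = stack.pop()
--         else:
--             nxt = set()
--             for coord in cur:
--                 n = step(coord, ch)
--                 edges.append((coord, n))
--                 nxt.add(n)
--             cur = nxt
--     else:
--         assert False
--
--     graph = {}
--     for a, b in edges:
--         graph.setdefault(a, set())
--         graph.setdefault(b, set())
--         graph[a].add(b)
--         graph[b].add(a)
--     return graph
-- ===== Notes on version B (the rewrite author's own statement) =====
-- stated objective: alternative
-- what changed: Replaces A's recursive aux that threads the graph dict through every move with a two-stage design: an iterative loop with an explicit frame stack that only collects a flat edge list, followed by a separate replay pass that builds the adjacency dict from the edges.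
import Mathlib
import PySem

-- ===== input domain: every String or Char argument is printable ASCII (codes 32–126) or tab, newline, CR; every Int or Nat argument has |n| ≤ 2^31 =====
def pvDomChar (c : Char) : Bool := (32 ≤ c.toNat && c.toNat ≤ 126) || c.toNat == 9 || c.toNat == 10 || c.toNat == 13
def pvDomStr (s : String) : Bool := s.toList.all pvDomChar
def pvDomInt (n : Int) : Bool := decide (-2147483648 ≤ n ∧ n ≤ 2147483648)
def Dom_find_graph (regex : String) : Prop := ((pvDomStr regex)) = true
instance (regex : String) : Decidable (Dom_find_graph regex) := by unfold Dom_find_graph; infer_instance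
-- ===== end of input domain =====

-- B replaces A's recursive, graph-threading `aux` by two staged passes: an iterative stack-frame
-- loop collecting only a flat edge list, then a replay pass building the adjacency dict;
-- objective: alternative decomposition, same cost.

-- ===== PORT A =====
-- A's nested helper `move`: updates the graph in place and returns the new coord; none = assert False
def pvMove (g : PySem.Dict (Int × Int) (PySem.Set (Int × Int))) (coord : Int × Int) (c : Char) :
    Option ((Int × Int) × PySem.Dict (Int × Int) (PySem.Set (Int × Int))) :=
  let n? : Option (Int × Int) :=
    if c = 'N' then some (coord.1, coord.2 - 1)
    else if c = 'S' then some (coord.1, coord.2 + 1)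
    else if c = 'W' then some (coord.1 - 1, coord.2)
    else if c = 'E' then some (coord.1 + 1, coord.2)
    else none
  match n? with
  | none => none    -- assert False
  | some n =>
    let g := if g.contains coord then g else g.insert coord PySem.Set.empty
    let g := if g.contains n then g else g.insert n PySem.Set.empty
    let g := g.modify coord PySem.Set.empty (fun s => s.add n)
    let g := g.modify n PySem.Set.empty (fun s => s.add coord)
    some (n, g)

-- the set comprehension {move(coord, c) for coord in cur}, threading the graph
def pvMoveAll (c : Char) (coords : List (Int × Int))
    (g : PySem.Dict (Int × Int) (PySem.Set (Int × Int))) (acc : PySem.Set (Int × Int)) :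
    Option (PySem.Set (Int × Int) × PySem.Dict (Int × Int) (PySem.Set (Int × Int))) :=
  match coords with
  | [] => some (acc, g)
  | co :: rest =>
    match pvMove g co c with
    | none => none
    | some (n, g') => pvMoveAll c rest g' (acc.add n)

-- A's recursive `aux`; the shared iterator is the remaining character list, returned on exit.
-- fuel only makes the nested recursion total (fuel = |regex| + 1 always suffices); none = AssertionError.
def pvAux : Nat → List Char → PySem.Dict (Int × Int) (PySem.Set (Int × Int)) →
    PySem.Set (Int × Int) → PySem.Set (Int × Int) → PySem.Set (Int × Int) →
    Option (PySem.Set (Int × Int) × List Char × PySem.Dict (Int × Int) (PySem.Set (Int × Int)))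
  | 0, _, _, _, _, _ => none
  | _ + 1, [], _, _, _, _ => none    -- iterator exhausted: assert False
  | fuel + 1, c :: rest, g, starts, finals, cur =>
    if c = '^' then pvAux fuel rest g starts finals cur
    else if c = '(' then
      match pvAux fuel rest g cur PySem.Set.empty cur with
      | none => none
      | some (ret, rest', g') => pvAux fuel rest' g' starts finals ret
    else if c = '|' then pvAux fuel rest g starts (PySem.Set.union finals cur) starts
    else if c = ')' ∨ c = '$' then some (PySem.Set.union finals cur, rest, g)
    else
      match pvMoveAll c cur g PySem.Set.empty with
      | none => none
      | some (cur', g') => pvAux fuel rest g' starts finals cur'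

def pvGraphOut (g : PySem.Dict (Int × Int) (PySem.Set (Int × Int))) :
    List (Int × Int × List (Int × Int)) :=
  g.items.map (fun p => (p.1.1, p.1.2, p.2))

def find_graph (regex : String) : List (Int × Int × List (Int × Int)) :=
  let cs := regex.toList
  let s0 : PySem.Set (Int × Int) := PySem.Set.ofList [(0, 0)]
  match pvAux (cs.length + 1) cs PySem.Dict.empty s0 PySem.Set.empty s0 with
  | some (_, _, g) => pvGraphOut g
  | none => []      -- Python raises here (outside Pre_)

-- ===== PORT B =====
-- B's `step`: pure coordinate move, no graph; none = assert False
def pvStep (coord : Int × Int) (c : Char) : Option (Int × Int) :=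
  if c = 'N' then some (coord.1, coord.2 - 1)
  else if c = 'S' then some (coord.1, coord.2 + 1)
  else if c = 'W' then some (coord.1 - 1, coord.2)
  else if c = 'E' then some (coord.1 + 1, coord.2)
  else none

-- B's inner for-loop over `cur`: appends edges, accumulates the next frontier
def pvStepCur (c : Char) : List (Int × Int) → List ((Int × Int) × (Int × Int)) →
    PySem.Set (Int × Int) →
    Option (List ((Int × Int) × (Int × Int)) × PySem.Set (Int × Int))
  | [], es, acc => some (es, acc)
  | co :: rest, es, acc =>
    match pvStep co c with
    | none => none
    | some n => pvStepCur c rest (es ++ [(co, n)]) (acc.add n)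

-- B's pass 1: iterative loop with an explicit frame stack, collecting only the edge list
def pvCollect : List Char → List ((Int × Int) × (Int × Int)) →
    List (PySem.Set (Int × Int) × PySem.Set (Int × Int)) →
    PySem.Set (Int × Int) → PySem.Set (Int × Int) → PySem.Set (Int × Int) →
    Option (List ((Int × Int) × (Int × Int)))
  | [], _, _, _, _, _ => none    -- for-else: loop ends without a break: assert False
  | c :: rest, es, stack, starts, finals, cur =>
    if c = '^' then pvCollect rest es stack starts finals cur
    else if c = '(' then pvCollect rest es ((starts, finals) :: stack) cur PySem.Set.empty cur
    else if c = '|' then pvCollect rest es stack starts (PySem.Set.union finals cur) starts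
    else if c = ')' ∨ c = '$' then
      match stack with
      | [] => some es
      | (s0, f0) :: st => pvCollect rest es st s0 f0 (PySem.Set.union finals cur)
    else
      match pvStepCur c cur es PySem.Set.empty with
      | none => none
      | some (es', cur') => pvCollect rest es' stack starts finals cur'

-- B's pass 2: replay one edge into the dict
def pvGraphStep (g : PySem.Dict (Int × Int) (PySem.Set (Int × Int)))
    (e : (Int × Int) × (Int × Int)) : PySem.Dict (Int × Int) (PySem.Set (Int × Int)) :=
  let g := if g.contains e.1 then g else g.insert e.1 PySem.Set.empty
  let g := if g.contains e.2 then g else g.insert e.2 PySem.Set.empty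
  let g := g.modify e.1 PySem.Set.empty (fun s => s.add e.2)
  g.modify e.2 PySem.Set.empty (fun s => s.add e.1)

def pvBuild (es : List ((Int × Int) × (Int × Int))) :
    PySem.Dict (Int × Int) (PySem.Set (Int × Int)) :=
  es.foldl pvGraphStep PySem.Dict.empty

def find_graph_alt (regex : String) : List (Int × Int × List (Int × Int)) :=
  let s0 : PySem.Set (Int × Int) := PySem.Set.ofList [(0, 0)]
  match pvCollect regex.toList [] [] s0 PySem.Set.empty s0 with
  | some es => (pvBuild es).items.map (fun p => (p.1.1, p.1.2, p.2))
  | none => []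

-- ===== PRECONDITION & SPEC =====
-- Pre_ excludes exactly the inputs where Python A raises AssertionError; closed form: some closer
-- (close-paren or dollar) occurs at nesting depth 0 (depth = openers minus closers in the prefix,
-- never negative before that point) with only the nine regex characters before it; later chars are unread.
def Pre_find_graph (regex : String) : Prop :=
  ((List.range regex.toList.length).any (fun k =>
    ((regex.toList.getD k ' ') == ')' || (regex.toList.getD k ' ') == '$') &&
    (regex.toList.take k).all (fun ch =>
      ch ∈ ['^', '(', '|', ')', '$', 'N', 'S', 'W', 'E']) &&
    ((regex.toList.take k).count '(' ==
      (regex.toList.take k).count ')' + (regex.toList.take k).count '$') &&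
    (List.range (k + 1)).all (fun j =>
      (regex.toList.take j).count ')' + (regex.toList.take j).count '$' ≤
        (regex.toList.take j).count '('))) = true
instance (regex : String) : Decidable (Pre_find_graph regex) := by
  unfold Pre_find_graph; infer_instance

def pvWitness_find_graph : String := "^E(N|S(W|)E)N$"

def Spec_find_graph (regex : String) (out : List (Int × Int × List (Int × Int))) : Prop :=
  out = find_graph_alt regex
instance (regex : String) (out : List (Int × Int × List (Int × Int))) :
    Decidable (Spec_find_graph regex out) := by unfold Spec_find_graph; infer_instance

-- ===== CLAIM =====
def Claim_equal_find_graph : Prop :=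
  ∀ (regex : String), Dom_find_graph regex → Pre_find_graph regex →
    Spec_find_graph regex (find_graph regex)

-- ===== LEMMAS AND PROOFS =====

-- proof-only intermediate: A's recursion shape, but collecting edges instead of threading the graph
def pvAuxE : Nat → List Char → List ((Int × Int) × (Int × Int)) →
    PySem.Set (Int × Int) → PySem.Set (Int × Int) → PySem.Set (Int × Int) →
    Option (PySem.Set (Int × Int) × List Char × List ((Int × Int) × (Int × Int)))
  | 0, _, _, _, _, _ => none
  | _ + 1, [], _, _, _, _ => none
  | fuel + 1, c :: rest, es, starts, finals, cur =>
    if c = '^' then pvAuxE fuel rest es starts finals cur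
    else if c = '(' then
      match pvAuxE fuel rest es cur PySem.Set.empty cur with
      | none => none
      | some (ret, rest', es') => pvAuxE fuel rest' es' starts finals ret
    else if c = '|' then pvAuxE fuel rest es starts (PySem.Set.union finals cur) starts
    else if c = ')' ∨ c = '$' then some (PySem.Set.union finals cur, rest, es)
    else
      match pvStepCur c cur es PySem.Set.empty with
      | none => none
      | some (es', cur') => pvAuxE fuel rest es' starts finals cur'

-- one move on a replayed graph = append the edge and replay
theorem pvMove_build (es : List ((Int × Int) × (Int × Int))) (co : Int × Int) (c : Char) :
    pvMove (pvBuild es) co c =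
      (pvStep co c).map (fun n => (n, pvBuild (es ++ [(co, n)]))) := by
  simp only [pvMove, pvStep, pvBuild, List.foldl_append, List.foldl_cons, List.foldl_nil,
    pvGraphStep]
  split_ifs <;> simp_all

-- the comprehension on a replayed graph = B's edge-collecting inner loop
theorem pvMoveAll_build (c : Char) : ∀ (coords : List (Int × Int))
    (es : List ((Int × Int) × (Int × Int))) (acc : PySem.Set (Int × Int)),
    pvMoveAll c coords (pvBuild es) acc =
      (pvStepCur c coords es acc).map (fun p => (p.2, pvBuild p.1)) := by
  intro coords
  induction coords with
  | nil => intro es acc; simp [pvMoveAll, pvStepCur]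
  | cons co rest ih =>
    intro es acc
    simp only [pvMoveAll, pvStepCur, pvMove_build]
    cases pvStep co c with
    | none => simp
    | some n => simpa using ih (es ++ [(co, n)]) (acc.add n)

-- A's recursion on a replayed graph = the edge-collecting recursion
theorem pvAux_build : ∀ (fuel : Nat) (cs : List Char) (es : List ((Int × Int) × (Int × Int)))
    starts finals cur,
    pvAux fuel cs (pvBuild es) starts finals cur =
      (pvAuxE fuel cs es starts finals cur).map (fun p => (p.1, p.2.1, pvBuild p.2.2)) := by
  intro fuel
  induction fuel with
  | zero => intro cs es starts finals cur; simp [pvAux, pvAuxE]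
  | succ fuel ih =>
    intro cs es starts finals cur
    match cs with
    | [] => simp [pvAux, pvAuxE]
    | c :: cs' =>
      simp only [pvAux, pvAuxE]
      split_ifs with h1 h2 h3 h4
      · exact ih cs' es starts finals cur
      · rw [ih cs' es cur PySem.Set.empty cur]
        cases hin : pvAuxE fuel cs' es cur PySem.Set.empty cur with
        | none => simp
        | some v =>
          obtain ⟨ret1, rest1, es1⟩ := v
          simpa using ih rest1 es1 starts finals ret1
      · exact ih cs' es starts (PySem.Set.union finals cur) starts
      · simp
      · rw [pvMoveAll_build]
        cases hmv : pvStepCur c cur es PySem.Set.empty with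
        | none => simp
        | some v =>
          obtain ⟨es1, cur1⟩ := v
          simpa using ih cs' es1 starts finals cur1

-- a successful edge-collecting recursion consumes at least its terminating closer
theorem pvAuxE_length : ∀ (fuel : Nat) (cs : List Char) es starts finals cur ret rest es',
    pvAuxE fuel cs es starts finals cur = some (ret, rest, es') → rest.length < cs.length := by
  intro fuel
  induction fuel with
  | zero => intro cs es starts finals cur ret rest es' h; simp [pvAuxE] at h
  | succ fuel ih =>
    intro cs es starts finals cur ret rest es' h
    match cs with
    | [] => simp [pvAuxE] at h
    | c :: cs' =>
      simp only [pvAuxE] at h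
      split_ifs at h with h1 h2 h3 h4
      · exact Nat.lt_succ_of_lt (ih _ _ _ _ _ _ _ _ h)
      · cases hin : pvAuxE fuel cs' es cur PySem.Set.empty cur with
        | none => rw [hin] at h; simp at h
        | some v =>
          obtain ⟨ret1, rest1, es1⟩ := v
          rw [hin] at h; simp only at h
          have l1 := ih _ _ _ _ _ _ _ _ hin
          have l2 := ih _ _ _ _ _ _ _ _ h
          simp only [List.length_cons]
          omega
      · exact Nat.lt_succ_of_lt (ih _ _ _ _ _ _ _ _ h)
      · cases h; simp
      · cases hmv : pvStepCur c cur es PySem.Set.empty with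
        | none => rw [hmv] at h; simp at h
        | some v =>
          obtain ⟨es1, cur1⟩ := v
          rw [hmv] at h; simp only at h
          exact Nat.lt_succ_of_lt (ih _ _ _ _ _ _ _ _ h)

-- the stack machine simulates the edge-collecting recursion
theorem pvSim : ∀ (fuel : Nat) (cs : List Char) es stack starts finals cur,
    cs.length < fuel →
    pvCollect cs es stack starts finals cur =
      (match pvAuxE fuel cs es starts finals cur with
       | none => none
       | some (ret, rest, es') =>
         match stack with
         | [] => some es'
         | (s0, f0) :: st => pvCollect rest es' st s0 f0 ret) := by
  intro fuel
  induction fuel with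
  | zero => intro cs es stack starts finals cur h; omega
  | succ fuel ih =>
    intro cs es stack starts finals cur h
    match cs with
    | [] => simp [pvAuxE, pvCollect]
    | c :: cs' =>
      have hlt : cs'.length < fuel := by simp at h; omega
      simp only [pvAuxE, pvCollect]
      split_ifs with h1 h2 h3 h4
      · exact ih cs' es stack starts finals cur hlt
      · rw [ih cs' es ((starts, finals) :: stack) cur PySem.Set.empty cur hlt]
        cases hin : pvAuxE fuel cs' es cur PySem.Set.empty cur with
        | none => simp
        | some v =>
          obtain ⟨ret1, rest1, es1⟩ := v
          simp only
          have : rest1.length < fuel := lt_trans (pvAuxE_length _ _ _ _ _ _ _ _ _ hin) hlt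
          rw [ih rest1 es1 stack starts finals ret1 this]
      · exact ih cs' es stack starts (PySem.Set.union finals cur) starts hlt
      · cases stack with
        | nil => simp
        | cons fr st => obtain ⟨s0, f0⟩ := fr; simp
      · cases hmv : pvStepCur c cur es PySem.Set.empty with
        | none => simp
        | some v =>
          obtain ⟨es1, cur1⟩ := v
          simp only
          exact ih cs' es1 stack starts finals cur1 hlt

-- ===== VERDICT =====
theorem find_graph_spec : Claim_equal_find_graph := by
  unfold Claim_equal_find_graph
  intro regex _ _
  unfold Spec_find_graph find_graph find_graph_alt
  simp only
  have hempty : (PySem.Dict.empty : PySem.Dict (Int × Int) (PySem.Set (Int × Int))) = pvBuild [] := rfl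
  rw [hempty, pvAux_build (regex.toList.length + 1) regex.toList []]
  rw [pvSim (regex.toList.length + 1) regex.toList [] []
        (PySem.Set.ofList [(0, 0)]) PySem.Set.empty (PySem.Set.ofList [(0, 0)])
        (Nat.lt_succ_self _)]
  cases pvAuxE (regex.toList.length + 1) regex.toList []
      (PySem.Set.ofList [(0, 0)]) PySem.Set.empty (PySem.Set.ofList [(0, 0)]) with
  | none => rfl
  | some v => obtain ⟨ret, rest, es⟩ := v; rfl
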